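-- pv_equiv track=rewrite | github.com/innat/medic-ai | medicai/trainer/nnunet/planning/planners.py | compute_n_pooling
-- ===== SOURCE A (Python) =====
-- from collections.abc import Sequence
--
-- def compute_n_pooling(
--     patch_size: Sequence[int],
--     min_feature_map_size: int = 4,
--     max_pooling: int = 6,
-- ) -> int:
--     """
--     Determine how many pooling layers can be applied given the patch size.
--
--     The smallest spatial dimension after n_pooling halves must be ≥ min_feature_map_size.
--     """
--     min_dim = min(patch_size)
--     n = 0
--     while n < max_pooling:
--         if min_dim // (2 ** (n + 1)) < min_feature_map_size:
--             break
--         n += 1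
--     return max(n, 1)  # at least 1 pooling layer
-- ===== SOURCE B (Python) =====
-- def compute_n_pooling(
--     patch_size,
--     min_feature_map_size: int = 4,
--     max_pooling: int = 6,
-- ) -> int:
--     """Closed form: largest k with min(patch_size) // 2**k >= min_feature_map_size,
--     clamped to [1, max_pooling]."""
--     q = min(patch_size) // min_feature_map_size
--     k = q.bit_length() - 1 if q >= 1 else 0
--     return max(min(k, max_pooling), 1)
-- ===== Notes on version B (the rewrite author's own statement) =====
-- stated objective: simpler
-- what changed: Replaces the bounded halving while-loop with a closed-form integer log: k = (min_dim // min_feature_map_size).bit_length() - 1, clamped to [1, max_pooling]; Pre_ restricts to the natural domain min_feature_map_size >= 1 (A's values for a non-positive feature-map size are accidental, and B's closed form divides by it) and excludes the empty list on which min() raises ValueError.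
-- outside the precondition, e.g. on compute_n_pooling([], 4, 6): A raises ValueError, B raises ValueError; on compute_n_pooling([8], 0, 6): A returns 6, B raises ZeroDivisionError; on compute_n_pooling([8], -1, 6): A returns 6, B returns 1
import Mathlib
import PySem

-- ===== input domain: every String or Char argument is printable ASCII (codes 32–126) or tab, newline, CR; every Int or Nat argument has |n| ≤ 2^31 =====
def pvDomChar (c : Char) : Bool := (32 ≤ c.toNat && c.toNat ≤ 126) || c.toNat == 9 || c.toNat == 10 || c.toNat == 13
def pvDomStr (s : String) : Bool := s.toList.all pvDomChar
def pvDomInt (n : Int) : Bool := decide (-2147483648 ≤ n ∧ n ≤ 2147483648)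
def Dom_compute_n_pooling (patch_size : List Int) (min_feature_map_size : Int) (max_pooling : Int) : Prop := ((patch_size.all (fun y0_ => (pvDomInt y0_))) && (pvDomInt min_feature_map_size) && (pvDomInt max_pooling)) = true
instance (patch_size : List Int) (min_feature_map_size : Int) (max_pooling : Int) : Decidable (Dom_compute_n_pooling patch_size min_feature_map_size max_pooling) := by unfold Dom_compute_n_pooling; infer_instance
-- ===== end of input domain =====

-- B replaces A's bounded halving loop with a closed-form integer-log (bit_length) formula; objective: simpler.

-- ===== PORT A =====
-- the while loop: n counts up while n < max_pooling; fuel = remaining iterations max_pooling - n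
def pvLoopA (min_dim mfs : Int) : Nat → Nat → Int
  | n, 0 => (n : Int)
  | n, fuel+1 =>
    if PySem.Int.floordiv min_dim (2 ^ (n+1)) < mfs then (n : Int)
    else pvLoopA min_dim mfs (n+1) fuel

def compute_n_pooling (patch_size : List Int) (min_feature_map_size : Int) (max_pooling : Int) : Int :=
  let min_dim := (PySem.List.min? patch_size (fun x => x)).getD 0  -- min(patch_size); none (empty) excluded by Pre_
  max (pvLoopA min_dim min_feature_map_size 0 max_pooling.toNat) 1

-- ===== PORT B =====
def compute_n_pooling_alt (patch_size : List Int) (min_feature_map_size : Int) (max_pooling : Int) : Int :=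
  let q := PySem.Int.floordiv ((PySem.List.min? patch_size (fun x => x)).getD 0) min_feature_map_size
  let k : Int := if 1 ≤ q then (PySem.Int.bitLength q : Int) - 1 else 0
  max (min k max_pooling) 1

-- ===== PRECONDITION & SPEC =====
-- Pre_ restricts to the natural domain: nonempty patch_size (min() raises ValueError on [])
-- and min_feature_map_size ≥ 1 (A's values for a non-positive feature-map size are accidental,
-- and B divides by min_feature_map_size).
def Pre_compute_n_pooling (patch_size : List Int) (min_feature_map_size : Int) (max_pooling : Int) : Prop :=
  patch_size ≠ [] ∧ 1 ≤ min_feature_map_size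
instance (patch_size : List Int) (min_feature_map_size : Int) (max_pooling : Int) : Decidable (Pre_compute_n_pooling patch_size min_feature_map_size max_pooling) := by unfold Pre_compute_n_pooling; infer_instance
def pvWitness_compute_n_pooling : List Int × Int × Int := ([64, 32, 48], 4, 6)

def Spec_compute_n_pooling (patch_size : List Int) (min_feature_map_size : Int) (max_pooling : Int) (out : Int) : Prop := out = compute_n_pooling_alt patch_size min_feature_map_size max_pooling
instance (patch_size : List Int) (min_feature_map_size : Int) (max_pooling : Int) (out : Int) : Decidable (Spec_compute_n_pooling patch_size min_feature_map_size max_pooling out) := by unfold Spec_compute_n_pooling; infer_instance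

-- ===== CLAIM (what is proved, stated in full; the proofs are below) =====
def Claim_equal_compute_n_pooling : Prop := ∀ (patch_size : List Int) (min_feature_map_size : Int) (max_pooling : Int), Dom_compute_n_pooling patch_size min_feature_map_size max_pooling → Pre_compute_n_pooling patch_size min_feature_map_size max_pooling → Spec_compute_n_pooling patch_size min_feature_map_size max_pooling (compute_n_pooling patch_size min_feature_map_size max_pooling)

-- ===== LEMMAS AND PROOFS =====

-- the break condition already holds at n: the loop returns n
lemma pvLoopA_stop (m mfs : Int) (n : Nat)
    (h : PySem.Int.floordiv m (2 ^ (n+1)) < mfs) :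
    ∀ fuel, pvLoopA m mfs n fuel = (n : Int) := by
  intro fuel
  cases fuel with
  | zero => rfl
  | succ f => simp only [pvLoopA, if_pos h]

-- the break condition holds exactly from index L on: the loop returns min L (n + fuel)
lemma pvLoopA_first (m mfs : Int) (L : Nat)
    (h : ∀ k : Nat, (PySem.Int.floordiv m (2 ^ (k+1)) < mfs) ↔ L ≤ k) :
    ∀ (fuel n : Nat), n ≤ L → pvLoopA m mfs n fuel = ((min L (n + fuel) : Nat) : Int) := by
  intro fuel
  induction fuel with
  | zero =>
    intro n hn
    simp [pvLoopA]; omega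
  | succ f ih =>
    intro n hn
    by_cases hL : L ≤ n
    · have hn' : n = L := le_antisymm hn hL
      rw [pvLoopA_stop m mfs n ((h n).mpr hL)]
      congr 1; omega
    · have hc : ¬ (PySem.Int.floordiv m (2 ^ (n+1)) < mfs) := by
        rw [h n]; omega
      simp only [pvLoopA, if_neg hc]
      rw [ih (n+1) (by omega)]
      congr 1; omega

-- ===== VERDICT (by name: the statement is the Claim_ definition above) =====

theorem compute_n_pooling_spec : Claim_equal_compute_n_pooling := by
  intro ps mfs mp _ hpre
  obtain ⟨-, h1⟩ := hpre
  unfold Spec_compute_n_pooling compute_n_pooling compute_n_pooling_alt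
  set m : Int := (PySem.List.min? ps (fun x => x)).getD 0 with hm
  simp only []
  have hpos : (0 : Int) < mfs := by omega
  set q : Int := PySem.Int.floordiv m mfs with hq
  by_cases h2 : 2 ≤ q
  · -- the first break index is L = bit_length q - 1 ≥ 1
    rw [if_pos (by omega : (1:Int) ≤ q)]
    set B : Nat := PySem.Int.bitLength q with hB
    have hub : q < 2 ^ B := by
      have := PySem.Int.lt_two_pow_bitLength q
      have h' : (q.natAbs : Int) < ((2 : Nat) ^ B : Nat) := by exact_mod_cast this
      rw [Int.natAbs_of_nonneg (by omega)] at h'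
      simpa using h'
    have hlb : (2 : Int) ^ (B - 1) ≤ q := by
      have := PySem.Int.two_pow_bitLength_le q (by omega)
      have h' : (((2 : Nat) ^ (B - 1) : Nat) : Int) ≤ (q.natAbs : Int) := by exact_mod_cast this
      rw [Int.natAbs_of_nonneg (by omega)] at h'
      simpa using h'
    have hB1 : 1 ≤ B := by
      by_contra hc
      have : B = 0 := by omega
      rw [this] at hub; simp at hub; omega
    set L : Nat := B - 1 with hL
    have hiff : ∀ k : Nat, (PySem.Int.floordiv m (2 ^ (k+1)) < mfs) ↔ L ≤ k := by
      intro k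
      rw [PySem.Int.floordiv_lt_iff_lt_mul (by positivity)]
      have key : m < mfs * 2 ^ (k+1) ↔ q < 2 ^ (k+1) := by
        rw [hq, PySem.Int.floordiv_lt_iff_lt_mul hpos, mul_comm]
      rw [key]
      constructor
      · intro hlt
        by_contra hk
        have hkL : k + 1 ≤ L := by omega
        have : (2:Int) ^ (k+1) ≤ 2 ^ L :=
          pow_le_pow_right₀ (by norm_num) hkL
        omega
      · intro hk
        have hBk : B ≤ k + 1 := by omega
        calc q < 2 ^ B := hub
        _ ≤ 2 ^ (k+1) := pow_le_pow_right₀ (by norm_num) hBk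
    rw [pvLoopA_first m mfs L hiff mp.toNat 0 (Nat.zero_le L)]
    omega
  · -- q < 2: the loop breaks immediately, and B's k is 0
    have hc : PySem.Int.floordiv m (2 ^ (0+1)) < mfs := by
      rw [PySem.Int.floordiv_lt_iff_lt_mul (by norm_num)]
      rw [hq, PySem.Int.le_floordiv_iff_mul_le hpos] at h2
      omega
    rw [pvLoopA_stop m mfs 0 hc]
    by_cases hq1 : 1 ≤ q
    · have hq1' : q = 1 := by omega
      have hb1 : PySem.Int.bitLength (1:Int) = 1 := by decide
      rw [if_pos hq1, hq1', hb1]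
      norm_num
    · rw [if_neg hq1]
      norm_num
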